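-- pv_equiv track=rewrite | github.com/kunj290506/NakshaNirman | backend/layout_engine.py | _normalize_reasoning_lines
-- ===== SOURCE A (Python) =====
-- def _normalize_reasoning_lines(lines: list[str], limit: int = 16) -> list[str]:
--     out: list[str] = []
--     seen: set[str] = set()
--     for raw in lines:
--         msg = str(raw or "").strip()
--         if not msg:
--             continue
--         if len(msg) > 170:
--             msg = msg[:167].rstrip() + "..."
--         key = msg.lower()
--         if key in seen:
--             continue
--         seen.add(key)
--         out.append(msg)
--         if len(out) >= limit:
--             break
--     return out
-- ===== SOURCE B (Python) =====
-- def _clean(raw):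
--     c = str(raw or "").strip()
--     if len(c) > 170:
--         c = c[:167].rstrip() + "..."
--     return c
--
--
-- def _normalize_reasoning_lines(lines: list[str], limit: int = 16) -> list[str]:
--     # Sieve: pop the next cleaned line, keep it, and filter every later
--     # duplicate (case-insensitive) out of the pending list; no seen-set.
--     out: list[str] = []
--     pending = [_clean(raw) for raw in lines]
--     while pending:
--         if len(out) >= limit:
--             break
--         head = pending[0]
--         pending = pending[1:]
--         if not head:
--             continue
--         out.append(head)
--         low = head.lower()
--         pending = [x for x in pending if x.lower() != low]
--     return out
-- ===== Notes on version B (the rewrite author's own statement) =====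
-- stated objective: alternative
-- what changed: Replaces A's seen-set dedup (lazily skipping a line when its lowercase key was recorded) with an Eratosthenes-style sieve: each kept line eagerly filters all its later case-insensitive duplicates out of the pending list, so no seen-set or dict exists at all.
-- intended difference: When limit <= 0 and some line strips to nonblank, A still returns its first cleaned line because its cap check runs only after appending, while B caps at zero lines, which is the intended meaning of a nonpositive limit. — e.g. on _normalize_reasoning_lines(["a"], 0): A returns ["a"], B returns []
import Mathlib
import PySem

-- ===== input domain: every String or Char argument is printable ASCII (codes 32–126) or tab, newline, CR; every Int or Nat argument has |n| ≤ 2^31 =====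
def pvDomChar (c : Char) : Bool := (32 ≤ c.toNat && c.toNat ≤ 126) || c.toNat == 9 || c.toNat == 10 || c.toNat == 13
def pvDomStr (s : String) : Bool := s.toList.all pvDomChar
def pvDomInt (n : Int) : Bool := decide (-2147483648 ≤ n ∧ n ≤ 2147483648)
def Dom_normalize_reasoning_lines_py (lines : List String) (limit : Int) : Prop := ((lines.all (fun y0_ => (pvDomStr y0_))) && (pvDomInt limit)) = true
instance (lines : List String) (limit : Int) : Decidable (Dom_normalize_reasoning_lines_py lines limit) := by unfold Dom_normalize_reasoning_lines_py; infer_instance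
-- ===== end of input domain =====

-- B replaces A's seen-set dedup by a sieve: each kept line eagerly filters its later
-- case-insensitive duplicates out of the pending list (no seen-set/dict); on limit ≤ 0
-- with a nonblank line A still returns one line while B returns [] (stated as D_ below).


-- ===== PORT A =====
-- the `if len(msg) > 170` truncation of A
def pvTruncA (msg : String) : String :=
  if 170 < PySem.Str.len msg then
    PySem.Str.rstrip (PySem.Str.slice msg none (some 167)) ++ "..."
  else msg

-- A's for-loop with state (out, seen); `break` = returning out' directly
def pvLoopA (limit : Int) : List String → List String → PySem.Set String → List String
  | [], out, _ => out
  | raw :: rest, out, seen =>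
    let msg := PySem.Str.strip raw
    if msg = "" then pvLoopA limit rest out seen
    else
      let msg := pvTruncA msg
      let key := PySem.Str.lower msg
      if PySem.Set.contains seen key then pvLoopA limit rest out seen
      else
        let out' := out ++ [msg]
        if limit ≤ (out'.length : Int) then out'
        else pvLoopA limit rest out' (PySem.Set.add seen key)

def normalize_reasoning_lines_py (lines : List String) (limit : Int) : List String :=
  pvLoopA limit lines [] PySem.Set.empty

-- ===== PORT B =====
-- Source B's _clean
def pvCleanB (raw : String) : String :=
  let c := PySem.Str.strip raw
  if 170 < PySem.Str.len c then
    PySem.Str.rstrip (PySem.Str.slice c none (some 167)) ++ "..."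
  else c

-- Source B's while-loop: pop the head of `pending`, keep it, filter its later
-- case-insensitive duplicates out of `pending`; fuel (= initial pending length)
-- only makes the recursion structural, it is never exhausted
def pvSieveB (limit : Int) : Nat → List String → List String → List String
  | _, [], out => out
  | 0, _ :: _, out => out
  | fuel + 1, head :: pending, out =>
    if limit ≤ (out.length : Int) then out
    else if head = "" then pvSieveB limit fuel pending out
    else pvSieveB limit fuel
      (pending.filter (fun x => PySem.Str.lower x != PySem.Str.lower head))
      (out ++ [head])

def normalize_reasoning_lines_py_alt (lines : List String) (limit : Int) : List String :=
  pvSieveB limit (lines.map pvCleanB).length (lines.map pvCleanB) []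

-- ===== PRECONDITION & SPEC =====
-- When limit ≤ 0 and some line strips to nonblank, A still returns its first cleaned
-- line (its cap check runs only after appending) while B caps at zero lines, which is
-- the intended meaning of a nonpositive limit.
def D_normalize_reasoning_lines_py (lines : List String) (limit : Int) : Prop :=
  limit ≤ 0 ∧ (lines.any (fun raw => PySem.Str.strip raw != "")) = true
instance (lines : List String) (limit : Int) : Decidable (D_normalize_reasoning_lines_py lines limit) := by unfold D_normalize_reasoning_lines_py; infer_instance

def Spec_normalize_reasoning_lines_py (lines : List String) (limit : Int) (out : List String) : Prop := ¬ D_normalize_reasoning_lines_py lines limit → out = normalize_reasoning_lines_py_alt lines limit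
instance (lines : List String) (limit : Int) (out : List String) : Decidable (Spec_normalize_reasoning_lines_py lines limit out) := by unfold Spec_normalize_reasoning_lines_py; infer_instance

def pvDiffWitness_normalize_reasoning_lines_py : List String × Int := (["a"], 0)
def pvDiffWitnessOut_normalize_reasoning_lines_py : (List String) × (List String) := (["a"], [])

-- ===== CLAIM (what is proved, stated in full; the proofs are below) =====
def Claim_unchanged_normalize_reasoning_lines_py : Prop := ∀ (lines : List String) (limit : Int), Dom_normalize_reasoning_lines_py lines limit → Spec_normalize_reasoning_lines_py lines limit (normalize_reasoning_lines_py lines limit)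
def Claim_changed_normalize_reasoning_lines_py : Prop := Dom_normalize_reasoning_lines_py (pvDiffWitness_normalize_reasoning_lines_py.1) (pvDiffWitness_normalize_reasoning_lines_py.2) ∧ D_normalize_reasoning_lines_py (pvDiffWitness_normalize_reasoning_lines_py.1) (pvDiffWitness_normalize_reasoning_lines_py.2) ∧ normalize_reasoning_lines_py (pvDiffWitness_normalize_reasoning_lines_py.1) (pvDiffWitness_normalize_reasoning_lines_py.2) = pvDiffWitnessOut_normalize_reasoning_lines_py.1 ∧ normalize_reasoning_lines_py_alt (pvDiffWitness_normalize_reasoning_lines_py.1) (pvDiffWitness_normalize_reasoning_lines_py.2) = pvDiffWitnessOut_normalize_reasoning_lines_py.2 ∧ pvDiffWitnessOut_normalize_reasoning_lines_py.1 ≠ pvDiffWitnessOut_normalize_reasoning_lines_py.2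
def Claim_exact_normalize_reasoning_lines_py : Prop := ∀ (lines : List String) (limit : Int), Dom_normalize_reasoning_lines_py lines limit → D_normalize_reasoning_lines_py lines limit → normalize_reasoning_lines_py lines limit ≠ normalize_reasoning_lines_py_alt lines limit

-- ===== LEMMAS AND PROOFS =====

lemma pvCleanB_eq_truncA (raw : String) :
    pvCleanB raw = pvTruncA (PySem.Str.strip raw) := by
  simp [pvCleanB, pvTruncA]

lemma pvTruncA_ne_empty (msg : String) (h : msg ≠ "") : pvTruncA msg ≠ "" := by
  unfold pvTruncA
  split_ifs with hlen
  · intro hc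
    have := congrArg String.toList hc
    simp at this
  · exact h

lemma pvLower_ne_empty (c : String) (h : c ≠ "") : PySem.Str.lower c ≠ "" := by
  intro hc
  apply h
  have h1 := congrArg String.toList hc
  simp [PySem.Str.toList_lower, PySem.Chars.lower] at h1
  exact h1

-- B's sieve ignores its accumulator once the cap is reached
lemma pvSieveB_stop (limit : Int) (out : List String)
    (hle : limit ≤ (out.length : Int)) :
    ∀ (fuel : Nat) (pending : List String), pvSieveB limit fuel pending out = out := by
  intro fuel pending
  cases fuel with
  | zero => cases pending <;> rfl
  | succ f =>
    cases pending with
    | nil => rfl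
    | cons hd tl => simp only [pvSieveB]; rw [if_pos hle]

-- core invariant: A's loop on (rest, out, seen) equals B's sieve on the cleaned
-- rest with the seen keys already filtered away, as long as the cap has not been
-- reached and "" never entered seen
lemma pvLoopA_eq_sieve (limit : Int) (rest : List String) :
    ∀ (out : List String) (seen : PySem.Set String) (fuel : Nat),
    (out.length : Int) < limit → "" ∉ seen →
    ((rest.map pvCleanB).filter (fun c => decide (PySem.Str.lower c ∉ seen))).length ≤ fuel →
    pvLoopA limit rest out seen
      = pvSieveB limit fuel
          ((rest.map pvCleanB).filter
            (fun c => decide (PySem.Str.lower c ∉ seen))) out := by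
  induction rest with
  | nil =>
    intro out seen fuel h _ _
    cases fuel <;> simp [pvLoopA, pvSieveB]
  | cons raw rest ih =>
    intro out seen fuel h hempty hfuel
    have hne : ¬ limit ≤ (out.length : Int) := by omega
    by_cases hb : PySem.Str.strip raw = ""
    · have hc : pvCleanB raw = "" := by simp [pvCleanB, hb, PySem.Str.len_eq]
      have hlow : PySem.Str.lower ("" : String) = "" := by decide
      have hcons : ((raw :: rest).map pvCleanB).filter
            (fun c => decide (PySem.Str.lower c ∉ seen))
          = "" :: (rest.map pvCleanB).filter (fun c => decide (PySem.Str.lower c ∉ seen)) := by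
        rw [List.map_cons, hc, List.filter_cons_of_pos (by simp [hlow]; exact hempty)]
      rw [hcons] at hfuel ⊢
      obtain ⟨f, rfl⟩ : ∃ f, fuel = f + 1 := by
        cases fuel with
        | zero => simp at hfuel
        | succ f => exact ⟨f, rfl⟩
      have hfuel' : ((rest.map pvCleanB).filter
          (fun c => decide (PySem.Str.lower c ∉ seen))).length ≤ f := by
        simp only [List.length_cons] at hfuel; omega
      rw [show pvLoopA limit (raw :: rest) out seen = pvLoopA limit rest out seen by
        simp [pvLoopA, hb]]
      rw [ih out seen f h hempty hfuel']
      simp only [pvSieveB]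
      rw [if_neg hne]
      simp
    · have hclean : pvCleanB raw = pvTruncA (PySem.Str.strip raw) := pvCleanB_eq_truncA raw
      set c := pvTruncA (PySem.Str.strip raw) with hcdef
      have hcne : c ≠ "" := pvTruncA_ne_empty _ hb
      by_cases hk : PySem.Str.lower c ∈ seen
      · -- A skips; B's filter already removed c
        have hcons : ((raw :: rest).map pvCleanB).filter
              (fun x => decide (PySem.Str.lower x ∉ seen))
            = (rest.map pvCleanB).filter (fun x => decide (PySem.Str.lower x ∉ seen)) := by
          rw [List.map_cons, hclean, List.filter_cons_of_neg (by simp [hk])]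
        rw [hcons] at hfuel ⊢
        rw [show pvLoopA limit (raw :: rest) out seen = pvLoopA limit rest out seen by
          simp [pvLoopA, hb, ← hcdef, hk]]
        exact ih out seen fuel h hempty hfuel
      · have hcons : ((raw :: rest).map pvCleanB).filter
              (fun x => decide (PySem.Str.lower x ∉ seen))
            = c :: (rest.map pvCleanB).filter (fun x => decide (PySem.Str.lower x ∉ seen)) := by
          rw [List.map_cons, hclean, List.filter_cons_of_pos (by simp [hk])]
        rw [hcons] at hfuel ⊢
        obtain ⟨f, rfl⟩ : ∃ f, fuel = f + 1 := by
          cases fuel with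
          | zero => simp at hfuel
          | succ f => exact ⟨f, rfl⟩
        have hfuel' : ((rest.map pvCleanB).filter
            (fun x => decide (PySem.Str.lower x ∉ seen))).length ≤ f := by
          simp only [List.length_cons] at hfuel; omega
        have hstep : pvSieveB limit (f + 1)
              (c :: (rest.map pvCleanB).filter (fun x => decide (PySem.Str.lower x ∉ seen))) out
            = pvSieveB limit f
                (((rest.map pvCleanB).filter (fun x => decide (PySem.Str.lower x ∉ seen))).filter
                  (fun x => PySem.Str.lower x != PySem.Str.lower c)) (out ++ [c]) := by
          simp only [pvSieveB]
          rw [if_neg hne, if_neg hcne]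
        by_cases hstop : limit ≤ (out.length : Int) + 1
        · -- A appends and breaks; B appends and its cap check stops it next round
          rw [show pvLoopA limit (raw :: rest) out seen = out ++ [c] by
            simp [pvLoopA, hb, ← hcdef, hk]
            intro hcon
            omega]
          rw [hstep, pvSieveB_stop limit (out ++ [c]) (by simp; omega)]
        · -- both continue: seen grows by the key ↔ pending filtered by the key
          have hlt : (((out ++ [c]).length : Int)) < limit := by simp; omega
          have hadd : PySem.Set.add seen (PySem.Str.lower c) = seen ++ [PySem.Str.lower c] :=
            PySem.Set.add_of_not_mem hk
          have hempty' : "" ∉ seen ++ [PySem.Str.lower c] := by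
            intro hm
            rcases List.mem_append.1 hm with hm | hm
            · exact hempty hm
            · exact pvLower_ne_empty c hcne (List.mem_singleton.1 hm).symm
          have hfilter :
              (rest.map pvCleanB).filter
                (fun x => decide (PySem.Str.lower x ∉ seen ++ [PySem.Str.lower c]))
              = ((rest.map pvCleanB).filter
                  (fun x => decide (PySem.Str.lower x ∉ seen))).filter
                  (fun x => PySem.Str.lower x != PySem.Str.lower c) := by
            rw [List.filter_filter]
            apply List.filter_congr
            intro x _
            by_cases h1 : PySem.Str.lower x ∈ seen
            · simp [h1]
            · by_cases h2 : PySem.Str.lower x = PySem.Str.lower c <;> simp [h1, h2]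
          have hfuel'' : ((rest.map pvCleanB).filter
              (fun x => decide (PySem.Str.lower x ∉ seen ++ [PySem.Str.lower c]))).length
              ≤ f := by
            rw [hfilter]
            exact le_trans (List.length_filter_le _ _) hfuel'
          rw [show pvLoopA limit (raw :: rest) out seen
              = pvLoopA limit rest (out ++ [c]) (PySem.Set.add seen (PySem.Str.lower c)) by
            simp [pvLoopA, hb, ← hcdef, hk, hstop]]
          rw [hadd]
          rw [ih (out ++ [c]) (seen ++ [PySem.Str.lower c]) f hlt hempty' hfuel'']
          rw [hfilter, hstep]

-- when every line strips blank, A's loop never appends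
lemma pvLoopA_all_blank (limit : Int) (lines : List String) :
    ∀ (out : List String) (seen : PySem.Set String),
    (∀ raw ∈ lines, PySem.Str.strip raw = "") →
    pvLoopA limit lines out seen = out := by
  induction lines with
  | nil => intro out seen _; simp [pvLoopA]
  | cons raw rest ih =>
    intro out seen hall
    have hb := hall raw (by simp)
    rw [show pvLoopA limit (raw :: rest) out seen = pvLoopA limit rest out seen by
      simp [pvLoopA, hb]]
    exact ih out seen (fun r hr => hall r (List.mem_cons_of_mem _ hr))

-- when limit ≤ 0, B's sieve returns its accumulator untouched
lemma pvSieveB_nonpos (limit : Int) (hlim : limit ≤ 0) (fuel : Nat) (pending : List String) :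
    pvSieveB limit fuel pending [] = [] :=
  pvSieveB_stop limit [] (by simp; omega) fuel pending

-- inside D_ with limit ≤ 0, A returns a nonempty list
lemma pvLoopA_ne_nil (limit : Int) (hlim : limit ≤ 0) (lines : List String) :
    (lines.any (fun raw => PySem.Str.strip raw != "")) = true →
    pvLoopA limit lines [] PySem.Set.empty ≠ [] := by
  induction lines with
  | nil => intro h; simp at h
  | cons raw rest ih =>
    intro h
    by_cases hb : PySem.Str.strip raw = ""
    · rw [show pvLoopA limit (raw :: rest) [] PySem.Set.empty
          = pvLoopA limit rest [] PySem.Set.empty by simp [pvLoopA, hb]]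
      apply ih
      simp only [List.any_cons, hb] at h
      simpa using h
    · rw [show pvLoopA limit (raw :: rest) [] PySem.Set.empty
          = [pvTruncA (PySem.Str.strip raw)] by
        simp [pvLoopA, hb]
        intro hcon
        omega]
      simp

-- ===== VERDICT (by name: the statement is the Claim_ definition above) =====
theorem normalize_reasoning_lines_py_spec : Claim_unchanged_normalize_reasoning_lines_py := by
  intro lines limit _ hD
  unfold D_normalize_reasoning_lines_py at hD
  push Not at hD
  by_cases hlim : limit ≤ 0
  · have hall := hD hlim
    have hall' : ∀ raw ∈ lines, PySem.Str.strip raw = "" := by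
      intro raw hr
      by_contra hne
      have : (lines.any (fun raw => PySem.Str.strip raw != "")) = true := by
        rw [List.any_eq_true]
        exact ⟨raw, hr, by simpa using hne⟩
      exact hall this
    unfold normalize_reasoning_lines_py
    rw [pvLoopA_all_blank limit lines [] PySem.Set.empty hall']
    unfold normalize_reasoning_lines_py_alt
    rw [pvSieveB_nonpos limit hlim]
  · have hpos : (([] : List String).length : Int) < limit := by simp; omega
    unfold normalize_reasoning_lines_py normalize_reasoning_lines_py_alt
    have hid : ((lines.map pvCleanB).filter
        (fun c => decide (PySem.Str.lower c ∉ (PySem.Set.empty : PySem.Set String))))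
        = lines.map pvCleanB := by
      apply List.filter_eq_self.2
      intro x _
      simp [PySem.Set.empty]
    rw [pvLoopA_eq_sieve limit lines [] PySem.Set.empty (lines.map pvCleanB).length hpos
        (by simp [PySem.Set.empty]) (by rw [hid])]
    rw [hid]

theorem normalize_reasoning_lines_py_changed : Claim_changed_normalize_reasoning_lines_py := by
  unfold Claim_changed_normalize_reasoning_lines_py; decide

theorem normalize_reasoning_lines_py_tight : Claim_exact_normalize_reasoning_lines_py := by
  intro lines limit _ hD
  obtain ⟨hlim, hany⟩ := hD
  have hA := pvLoopA_ne_nil limit hlim lines hany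
  unfold normalize_reasoning_lines_py_alt
  rw [pvSieveB_nonpos limit hlim]
  exact hA
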